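-- pv_equiv track=rewrite | github.com/lambertius/playarr | backend/app/services/metadata_resolver.py | _find_separator_outside_brackets
-- ===== SOURCE A (Python) =====
-- def _find_separator_outside_brackets(text: str, separator: str) -> int:
--     """Find the first occurrence of *separator* that is NOT inside ()[] pairs.
--
--     Returns the index into *text* where the separator starts, or -1 if every
--     occurrence lives inside brackets/parentheses.
--     """
--     depth = 0
--     for i, ch in enumerate(text):
--         if ch in ("(", "["):
--             depth += 1
--         elif ch in (")", "]"):
--             depth = max(depth - 1, 0)
--         elif depth == 0 and text[i:i + len(separator)] == separator:
--             return i
--     return -1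
-- ===== SOURCE B (Python) =====
-- def _find_separator_outside_brackets(text: str, separator: str) -> int:
--     """Jump between occurrences of *separator* via str.find instead of testing
--     every character, carrying the bracket depth forward incrementally."""
--     depth = 0
--     scan = 0   # depth accounts for text[:scan]
--     start = 0
--     while True:
--         idx = text.find(separator, start)
--         if idx == -1 or idx >= len(text):
--             return -1
--         for ch in text[scan:idx]:
--             if ch in "([":
--                 depth += 1
--             elif ch in ")]":
--                 depth = max(depth - 1, 0)
--         scan = idx
--         ch = text[idx]
--         if depth == 0 and ch not in "()[]":
--             return idx
--         start = idx + 1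
-- ===== Notes on version B (the rewrite author's own statement) =====
-- stated objective: faster
-- what changed: Replaces the per-character guard pass with a repeated str.find jump between separator occurrences, advancing the bracket depth incrementally only over the skipped-over gaps and so avoiding a Python-level slice comparison at every index.
import Mathlib
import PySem

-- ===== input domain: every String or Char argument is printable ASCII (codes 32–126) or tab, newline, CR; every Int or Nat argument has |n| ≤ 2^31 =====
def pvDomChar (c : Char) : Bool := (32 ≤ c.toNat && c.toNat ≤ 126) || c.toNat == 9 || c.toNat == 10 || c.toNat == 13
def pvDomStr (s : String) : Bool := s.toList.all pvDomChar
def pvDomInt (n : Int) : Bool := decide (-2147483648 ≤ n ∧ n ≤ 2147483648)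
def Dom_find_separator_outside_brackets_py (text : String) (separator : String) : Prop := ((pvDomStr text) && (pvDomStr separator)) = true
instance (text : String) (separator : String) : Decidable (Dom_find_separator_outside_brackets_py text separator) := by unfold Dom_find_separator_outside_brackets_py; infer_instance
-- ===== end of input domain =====

-- B replaces A's per-character guard pass with repeated str.find jumps between separator
-- occurrences, carrying the bracket depth forward only over the skipped gaps (measured
-- faster by a constant factor; same exact return value).

-- ===== PORT A =====
-- literal transliteration of A's for-loop over enumerate(text)
def pvALoop (text sep : List Char) : List Char → Nat → Int → Int
  | [], _, _ => -1
  | ch :: rest, i, depth =>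
    if ch = '(' ∨ ch = '[' then pvALoop text sep rest (i + 1) (depth + 1)
    else if ch = ')' ∨ ch = ']' then pvALoop text sep rest (i + 1) (max (depth - 1) 0)
    else if depth = 0 ∧ PySem.List.slice text (some (i : Int)) (some ((i : Int) + (sep.length : Int))) = sep
      then (i : Int)
    else pvALoop text sep rest (i + 1) depth

def find_separator_outside_brackets_py (text : String) (separator : String) : Int :=
  pvALoop text.toList separator.toList text.toList 0 0

-- ===== PORT B =====
-- B-side: one bracket-depth step (the body of Source B's inner for-loop)
def pvStepB (d : Int) (ch : Char) : Int :=
  if ch = '(' ∨ ch = '[' then d + 1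
  else if ch = ')' ∨ ch = ']' then max (d - 1) 0
  else d

-- Source B's `while True` loop; the fuel (text.length+1-start strictly decreases) only makes it total
def pvBLoop (text sep : List Char) : Nat → Nat → Nat → Int → Int
  | 0, _, _, _ => -1
  | fuel + 1, start, scan, depth =>
    let idx := PySem.Chars.findFrom text sep (start : Int) none
    if idx = -1 ∨ (text.length : Int) ≤ idx then -1
    else
      let depth' := (PySem.List.slice text (some (scan : Int)) (some idx)).foldl pvStepB depth
      match PySem.List.pyGet? text idx with
      | none => -1   -- unreachable: idx is a valid index here
      | some ch =>
        if depth' = 0 ∧ ¬ (ch = '(' ∨ ch = ')' ∨ ch = '[' ∨ ch = ']') then idx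
        else pvBLoop text sep fuel (idx.toNat + 1) idx.toNat depth'

def find_separator_outside_brackets_py_alt (text : String) (separator : String) : Int :=
  pvBLoop text.toList separator.toList (text.toList.length + 1) 0 0 0

-- ===== PRECONDITION & SPEC =====
def Spec_find_separator_outside_brackets_py (text : String) (separator : String) (out : Int) : Prop := out = find_separator_outside_brackets_py_alt text separator
instance (text : String) (separator : String) (out : Int) : Decidable (Spec_find_separator_outside_brackets_py text separator out) := by unfold Spec_find_separator_outside_brackets_py; infer_instance

-- ===== CLAIM (what is proved, stated in full; the proofs are below) =====
def Claim_equal_find_separator_outside_brackets_py : Prop := ∀ (text : String) (separator : String), Dom_find_separator_outside_brackets_py text separator → Spec_find_separator_outside_brackets_py text separator (find_separator_outside_brackets_py text separator)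

-- ===== LEMMAS AND PROOFS =====

-- bracket depth of text[:p]
def pvD (text : List Char) (p : Nat) : Int := (text.take p).foldl pvStepB 0

def pvIsBr (c : Char) : Prop := c = '(' ∨ c = ')' ∨ c = '[' ∨ c = ']'

-- A returns at position p exactly when this holds
def pvHit (text sep : List Char) (p : Nat) : Prop :=
  pvD text p = 0 ∧ (∃ c, text[p]? = some c ∧ ¬ pvIsBr c) ∧ sep <+: text.drop p

theorem pvD_succ (text : List Char) (p : Nat) (h : p < text.length) :
    pvD text (p + 1) = pvStepB (pvD text p) text[p] := by
  unfold pvD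
  have ht : text.take (p + 1) = text.take p ++ [text[p]] := by
    rw [List.take_succ, List.getElem?_eq_getElem h]
    rfl
  rw [ht, List.foldl_append, List.foldl_cons, List.foldl_nil]

theorem pvSliceMatch (text sep : List Char) (i : Nat) :
    PySem.List.slice text (some (i : Int)) (some ((i : Int) + (sep.length : Int))) = sep
      ↔ sep <+: text.drop i := by
  rw [PySem.List.slice_natCast_add]
  exact ⟨fun h => h ▸ List.take_prefix _ _, fun h => (List.prefix_iff_eq_take.mp h).symm⟩

theorem pvA_hit (text sep : List Char) (p : Nat) (h : p < text.length)
    (hhit : pvHit text sep p) :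
    pvALoop text sep (text.drop p) p (pvD text p) = (p : Int) := by
  obtain ⟨hd, ⟨c, hc, hbr⟩, hpre⟩ := hhit
  rw [List.getElem?_eq_getElem h, Option.some_inj] at hc
  subst hc
  rw [List.drop_eq_getElem_cons h, pvALoop]
  rw [if_neg (fun h1 => hbr (by rcases h1 with h' | h' <;> simp [pvIsBr, h'])),
    if_neg (fun h2 => hbr (by rcases h2 with h' | h' <;> simp [pvIsBr, h'])),
    if_pos ⟨hd, (pvSliceMatch text sep p).mpr hpre⟩]

theorem pvA_miss (text sep : List Char) (p : Nat) (h : p < text.length)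
    (hnot : ¬ pvHit text sep p) :
    pvALoop text sep (text.drop p) p (pvD text p) =
      pvALoop text sep (text.drop (p + 1)) (p + 1) (pvD text (p + 1)) := by
  rw [List.drop_eq_getElem_cons h, pvALoop, pvD_succ text p h]
  have hget : text[p]? = some text[p] := List.getElem?_eq_getElem h
  by_cases h1 : text[p] = '(' ∨ text[p] = '['
  · rw [if_pos h1, pvStepB, if_pos h1]
  · rw [if_neg h1]
    by_cases h2 : text[p] = ')' ∨ text[p] = ']'
    · rw [if_pos h2, pvStepB, if_neg h1, if_pos h2]
    · rw [if_neg h2, pvStepB, if_neg h1, if_neg h2]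
      rw [if_neg (fun h3 => hnot ⟨h3.1,
        ⟨text[p], hget, fun hbr => by rcases hbr with h' | h' | h' | h' <;> tauto⟩,
        (pvSliceMatch text sep p).mp h3.2⟩)]

theorem pvA_none (text sep : List Char) (p : Nat) (h : text.length ≤ p) (d : Int) :
    pvALoop text sep (text.drop p) p d = -1 := by
  rw [List.drop_eq_nil_of_le h, pvALoop]

theorem pvA_skip_aux (text sep : List Char) (n : Nat) : ∀ (p : Nat),
    p + n ≤ text.length → (∀ i, p ≤ i → i < p + n → ¬ pvHit text sep i) →
    pvALoop text sep (text.drop p) p (pvD text p) =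
      pvALoop text sep (text.drop (p + n)) (p + n) (pvD text (p + n)) := by
  induction n with
  | zero => intro p _ _; rfl
  | succ n ih =>
    intro p hle hno
    rw [pvA_miss text sep p (by omega) (hno p le_rfl (by omega))]
    rw [show p + (n + 1) = p + 1 + n from by omega]
    exact ih (p + 1) (by omega) (fun i hi1 hi2 => hno i (by omega) (by omega))

theorem pvA_skip (text sep : List Char) (p q : Nat) (hpq : p ≤ q) (hq : q ≤ text.length)
    (hno : ∀ i, p ≤ i → i < q → ¬ pvHit text sep i) :
    pvALoop text sep (text.drop p) p (pvD text p) =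
      pvALoop text sep (text.drop q) q (pvD text q) := by
  have := pvA_skip_aux text sep (q - p) p (by omega)
    (fun i h1 h2 => hno i h1 (by omega))
  rwa [Nat.add_sub_cancel' hpq] at this

theorem pvNoPre_of_no_infix (text sep : List Char) (start : Nat)
    (h : ¬ sep <:+: text.drop start) :
    ∀ i, start ≤ i → ¬ sep <+: text.drop i := by
  intro i hi hpre
  apply h
  rw [← PySem.Chars.isIn_iff_infix, ← PySem.Chars.exists_prefix_drop_iff_isIn]
  exact ⟨i - start, by rwa [List.drop_drop, Nat.add_sub_cancel' hi]⟩

theorem pvB_main (text sep : List Char) : ∀ (fuel start scan : Nat),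
    scan ≤ start → start ≤ text.length → text.length + 1 ≤ fuel + start →
    pvBLoop text sep fuel start scan (pvD text scan) =
      pvALoop text sep (text.drop start) start (pvD text start) := by
  intro fuel
  induction fuel with
  | zero => intro start scan _ h2 h3; omega
  | succ fuel ih =>
    intro start scan hss hsl hfuel
    simp only [pvBLoop]
    by_cases hneg : PySem.Chars.findFrom text sep (start : Int) none = -1
    · rw [if_pos (Or.inl hneg)]
      have hni : ¬ sep <:+: text.drop start :=
        (PySem.Chars.findFrom_natCast_eq_neg_one_iff text sep start hsl).mp hneg
      have hno := pvNoPre_of_no_infix text sep start hni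
      rw [pvA_skip text sep start text.length hsl le_rfl
        (fun i h1 _ h => (hno i h1) h.2.2)]
      exact (pvA_none text sep text.length le_rfl _).symm
    · obtain ⟨hk, hpre, hmin⟩ := PySem.Chars.findFrom_natCast_spec text sep start hsl hneg
      have hidx0 : (0 : Int) ≤ PySem.Chars.findFrom text sep (start : Int) none :=
        le_trans (Int.natCast_nonneg start) hk
      obtain ⟨i, hi⟩ : ∃ i : Nat, PySem.Chars.findFrom text sep (start : Int) none = (i : Int) :=
        ⟨_, (Int.toNat_of_nonneg hidx0).symm⟩
      rw [hi] at hk hpre hmin ⊢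
      simp only [Int.toNat_natCast] at hpre hmin ⊢
      have hstart_le : start ≤ i := by exact_mod_cast hk
      by_cases hlen : text.length ≤ i
      · rw [if_pos (Or.inr (by exact_mod_cast hlen))]
        rw [pvA_skip text sep start text.length hsl le_rfl
          (fun j h1 h2 h => hmin j h1 (by omega) h.2.2)]
        exact (pvA_none text sep text.length le_rfl _).symm
      · push_neg at hlen
        rw [if_neg (by
          rintro (h' | h')
          · omega
          · have : (text.length : Int) ≤ (i : Int) := h'
            omega)]
        have hdepth : (PySem.List.slice text (some (scan : Int)) (some (i : Int))).foldl pvStepB (pvD text scan)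
            = pvD text i := by
          rw [PySem.List.slice_natCast]
          unfold pvD
          rw [← List.foldl_append, ← List.take_add,
            Nat.add_sub_cancel' (le_trans hss hstart_le)]
        have hget : PySem.List.pyGet? text ((i : Nat) : Int) = some text[i] := by
          rw [PySem.List.pyGet?_natCast, List.getElem?_eq_getElem hlen]
        rw [hdepth, hget]
        simp only []
        have hskip := pvA_skip text sep start i hstart_le (le_of_lt hlen)
          (fun j h1 h2 h => hmin j h1 h2 h.2.2)
        by_cases hcond : pvD text i = 0 ∧
            ¬ (text[i] = '(' ∨ text[i] = ')' ∨ text[i] = '[' ∨ text[i] = ']')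
        · have hhit : pvHit text sep i :=
            ⟨hcond.1, ⟨text[i], List.getElem?_eq_getElem hlen, hcond.2⟩, hpre⟩
          rw [if_pos hcond, hskip, pvA_hit text sep i hlen hhit]
        · have hnot : ¬ pvHit text sep i := by
            rintro ⟨hd, ⟨c, hc, hbr⟩, -⟩
            rw [List.getElem?_eq_getElem hlen, Option.some_inj] at hc
            subst hc
            exact hcond ⟨hd, hbr⟩
          rw [if_neg hcond, hskip, pvA_miss text sep i hlen hnot]
          exact ih (i + 1) i (by omega) (by omega) (by omega)

-- ===== VERDICT (by name: the statement is the Claim_ definition above) =====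
theorem find_separator_outside_brackets_py_spec : Claim_equal_find_separator_outside_brackets_py := by
  intro text separator _
  unfold Spec_find_separator_outside_brackets_py find_separator_outside_brackets_py
    find_separator_outside_brackets_py_alt
  have h := pvB_main text.toList separator.toList (text.toList.length + 1) 0 0
    le_rfl (Nat.zero_le _) (by omega)
  have hD : pvD text.toList 0 = 0 := rfl
  rw [hD, List.drop_zero] at h
  exact h.symm
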